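-- pv_equiv track=rewrite | github.com/2z2ch5ygmg-source/arls-backend | app/routers/v1/admin_tenants.py | _ordered_tenant_purge_tables
-- ===== SOURCE A (Python) =====
-- def _ordered_tenant_purge_tables(scoped_tables: dict[str, dict[str, bool]]) -> list[str]:
--     priority_tables = [
--         # 1) 업로드/임시 데이터
--         "guard_roster_import_files",
--         "guard_roster_import_sessions",
--         # 2) 첨부/파일
--         "employee_attachments",
--         "attachments",
--         "file_metadata",
--         # 3) 근태/요청/휴가
--         "attendance_records",
--         "attendance_requests",
--         "leave_requests",
--         "leaves",
--         # 4) 스케줄/템플릿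
--         "schedule_import_rows",
--         "schedule_import_batches",
--         "monthly_schedules",
--         "schedules_monthly_rows",
--         "schedules_monthly",
--         "schedule_templates",
--         # 5) 직원/계정
--         "employees",
--         "arls_users",
--         # 6) 지점/회사 관련
--         "sites_match_index",
--         "sites",
--         "companies",
--         # 7) 테넌트 연동/설정
--         "google_sheet_profiles",
--         "sheets_sync_log",
--         "sheets_sync_retry_queue",
--         "integration_event_log",
--         "integration_feature_flags",
--         "integration_audit_logs",
--         "soc_event_ingests",
--         "api_idempotency_keys",
--     ]
--     ordered: list[str] = []
--     for table_name in priority_tables: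
--         if table_name in scoped_tables and table_name not in ordered:
--             ordered.append(table_name)
--     for table_name in sorted(scoped_tables.keys()):
--         if table_name not in ordered:
--             ordered.append(table_name)
--     return ordered
-- ===== SOURCE B (Python) =====
-- def _ordered_tenant_purge_tables(scoped_tables: dict[str, dict[str, bool]]) -> list[str]:
--     priority_tables = [
--         "guard_roster_import_files",
--         "guard_roster_import_sessions",
--         "employee_attachments",
--         "attachments",
--         "file_metadata",
--         "attendance_records",
--         "attendance_requests",
--         "leave_requests",
--         "leaves",
--         "schedule_import_rows",
--         "schedule_import_batches",
--         "monthly_schedules",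
--         "schedules_monthly_rows",
--         "schedules_monthly",
--         "schedule_templates",
--         "employees",
--         "arls_users",
--         "sites_match_index",
--         "sites",
--         "companies",
--         "google_sheet_profiles",
--         "sheets_sync_log",
--         "sheets_sync_retry_queue",
--         "integration_event_log",
--         "integration_feature_flags",
--         "integration_audit_logs",
--         "soc_event_ingests",
--         "api_idempotency_keys",
--     ]
--     rank = {name: i for i, name in enumerate(priority_tables)}
--     sentinel = len(priority_tables)
--     return sorted(scoped_tables.keys(), key=lambda t: (rank.get(t, sentinel), t))
-- ===== Notes on version B (the rewrite author's own statement) =====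
-- stated objective: faster
-- what changed: Replaced A's two appending passes (priority-list scan plus a dedup sweep over the sorted keys, each membership-testing a growing list) by a precomputed rank dictionary and a single sorted() over the keys with key (rank-or-sentinel, name).
import Mathlib
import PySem

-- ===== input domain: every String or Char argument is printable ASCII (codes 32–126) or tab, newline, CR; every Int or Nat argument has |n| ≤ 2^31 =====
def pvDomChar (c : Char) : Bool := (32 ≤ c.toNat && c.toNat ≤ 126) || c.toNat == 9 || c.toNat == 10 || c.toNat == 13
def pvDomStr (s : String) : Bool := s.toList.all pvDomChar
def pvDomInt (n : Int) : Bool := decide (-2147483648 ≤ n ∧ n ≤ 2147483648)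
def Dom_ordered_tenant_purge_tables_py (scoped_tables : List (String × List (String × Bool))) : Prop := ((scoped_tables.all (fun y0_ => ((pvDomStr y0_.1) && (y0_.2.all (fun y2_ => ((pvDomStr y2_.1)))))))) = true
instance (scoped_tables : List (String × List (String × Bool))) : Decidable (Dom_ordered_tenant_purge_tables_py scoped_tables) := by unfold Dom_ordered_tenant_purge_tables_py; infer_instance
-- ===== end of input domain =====

-- B replaces A's two appending passes (each membership-testing a growing list, quadratic) by one
-- sort of the keys under the key (rank-in-priority-list with a sentinel, name); measured faster.


-- the fixed priority list both Pythons write out literally (shared data)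
def pvPriorityTables : List String :=
  ["guard_roster_import_files", "guard_roster_import_sessions",
   "employee_attachments", "attachments", "file_metadata",
   "attendance_records", "attendance_requests", "leave_requests", "leaves",
   "schedule_import_rows", "schedule_import_batches", "monthly_schedules",
   "schedules_monthly_rows", "schedules_monthly", "schedule_templates",
   "employees", "arls_users",
   "sites_match_index", "sites", "companies",
   "google_sheet_profiles", "sheets_sync_log", "sheets_sync_retry_queue",
   "integration_event_log", "integration_feature_flags", "integration_audit_logs",
   "soc_event_ingests", "api_idempotency_keys"]

-- ===== PORT A =====
-- dict[str, …] is an association list; its key view (unique keys, insertion order) is dedup of the fsts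
def ordered_tenant_purge_tables_py (scoped_tables : List (String × List (String × Bool))) : List String :=
  let keys := PySem.List.dedup (scoped_tables.map Prod.fst)
  -- first loop: for table_name in priority_tables: if table_name in scoped_tables and table_name not in ordered
  let ordered := pvPriorityTables.foldl
    (fun ord t => if t ∈ keys ∧ t ∉ ord then ord ++ [t] else ord) ([] : List String)
  -- second loop: for table_name in sorted(scoped_tables.keys()): if table_name not in ordered
  (PySem.List.sorted keys (fun x => x) false).foldl
    (fun ord t => if t ∉ ord then ord ++ [t] else ord) ordered

-- ===== PORT B =====
-- _RANK = {name: i for i, name in enumerate(_PRIORITY_TABLES)}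
def pvRank : PySem.Dict String Int :=
  (PySem.List.enumerate pvPriorityTables).foldl (fun d p => d.insert p.2 p.1) PySem.Dict.empty
-- _SENTINEL = len(_PRIORITY_TABLES)
def pvSentinel : Int := (pvPriorityTables.length : Int)
-- sorted(scoped_tables.keys(), key=lambda t: (_RANK.get(t, _SENTINEL), t))
def ordered_tenant_purge_tables_py_alt (scoped_tables : List (String × List (String × Bool))) : List String :=
  PySem.List.sorted2 (PySem.List.dedup (scoped_tables.map Prod.fst))
    (fun t => pvRank.getD t pvSentinel) (fun t => t) false

-- ===== PRECONDITION & SPEC =====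
def Spec_ordered_tenant_purge_tables_py (scoped_tables : List (String × List (String × Bool))) (out : List String) : Prop := out = ordered_tenant_purge_tables_py_alt scoped_tables
instance (scoped_tables : List (String × List (String × Bool))) (out : List String) : Decidable (Spec_ordered_tenant_purge_tables_py scoped_tables out) := by unfold Spec_ordered_tenant_purge_tables_py; infer_instance

-- ===== CLAIM (what is proved, stated in full; the proofs are below) =====
def Claim_equal_ordered_tenant_purge_tables_py : Prop := ∀ (scoped_tables : List (String × List (String × Bool))), Dom_ordered_tenant_purge_tables_py scoped_tables → Spec_ordered_tenant_purge_tables_py scoped_tables (ordered_tenant_purge_tables_py scoped_tables)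

-- ===== LEMMAS AND PROOFS =====

-- A's first loop appends exactly the priority tables that are present, in priority order
theorem pv_loop1 (K : List String) (P : List String) (acc : List String) (hnd : P.Nodup)
    (hacc : ∀ t ∈ P, t ∉ acc) :
    List.foldl (fun ord t => if t ∈ K ∧ t ∉ ord then ord ++ [t] else ord) acc P
      = acc ++ P.filter (fun t => decide (t ∈ K)) := by
  induction P generalizing acc with
  | nil => simp
  | cons x P ih =>
    simp only [List.foldl_cons, List.filter_cons]
    by_cases hx : x ∈ K
    · rw [if_pos ⟨hx, hacc x (by simp)⟩]
      rw [ih (acc ++ [x]) hnd.of_cons ?_]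
      · simp [hx, List.append_assoc]
      · intro t ht
        have hne : t ≠ x := by
          rcases List.nodup_cons.mp hnd with ⟨hxn, _⟩
          exact fun h => hxn (h ▸ ht)
        simp [hacc t (by simp [ht]), hne]
    · rw [if_neg (by tauto)]
      rw [ih acc hnd.of_cons (fun t ht => hacc t (by simp [ht]))]
      simp [hx]

-- A's second loop appends the not-yet-listed tables in the traversal order
theorem pv_loop2 (S : List String) (acc : List String) (hnd : S.Nodup) :
    List.foldl (fun ord t => if t ∉ ord then ord ++ [t] else ord) acc S
      = acc ++ S.filter (fun t => decide (t ∉ acc)) := by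
  induction S generalizing acc with
  | nil => simp
  | cons x S ih =>
    simp only [List.foldl_cons, List.filter_cons]
    by_cases hx : x ∈ acc
    · rw [if_neg (by simpa using hx)]
      rw [ih acc hnd.of_cons]
      simp [hx]
    · rw [if_pos hx]
      rw [ih (acc ++ [x]) hnd.of_cons]
      have hcg : S.filter (fun t => decide (t ∉ acc ++ [x])) = S.filter (fun t => decide (t ∉ acc)) := by
        apply List.filter_congr
        intro t ht
        have hne : t ≠ x := by
          rcases List.nodup_cons.mp hnd with ⟨hxn, _⟩
          exact fun h => hxn (h ▸ ht)
        simp [hne]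
      rw [hcg]
      simp [hx, List.append_assoc]

-- sorted2 with keys (k1, id) is sorted under the lexicographic key
theorem pv_sorted2_lex (xs : List String) (k1 : String → Int) :
    PySem.List.sorted2 xs k1 (fun t => t) false
      = PySem.List.sorted xs (fun t => (toLex (k1 t, t) : Int ×ₗ String)) false := by
  have h : (fun (a b : String) => (decide (k1 a < k1 b) || (!decide (k1 b < k1 a) && decide (a < b))))
      = fun a b => decide ((toLex (k1 a, a) : Int ×ₗ String) < toLex (k1 b, b)) := by
    funext a b
    rcases lt_trichotomy (k1 a) (k1 b) with h1 | h1 | h1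
    · simp [h1, not_lt_of_gt h1, Prod.Lex.lt_iff]
    · simp [h1, Prod.Lex.lt_iff]
    · simp [h1, not_lt_of_gt h1, Prod.Lex.lt_iff, ne_of_gt h1]
  show List.foldl (fun acc x => PySem.List.insertBy (fun a b => (decide (k1 a < k1 b) || (!decide (k1 b < k1 a) && decide (a < b)))) x acc) [] xs
      = List.foldl (fun acc x => PySem.List.insertBy (fun a b => decide ((toLex (k1 a, a) : Int ×ₗ String) < toLex (k1 b, b))) x acc) [] xs
  rw [h]

-- the concrete rank dictionary: keys and values
theorem pv_hkeys : pvRank.keys = pvPriorityTables := by decide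
theorem pv_hmap : pvPriorityTables.map (fun t => pvRank.getD t pvSentinel)
    = [0, 1, 2, 3, 4, 5, 6, 7, 8, 9, 10, 11, 12, 13, 14, 15, 16, 17, 18, 19, 20, 21, 22, 23, 24, 25, 26, 27] := by decide
theorem pv_nodupP : pvPriorityTables.Nodup := by decide

theorem pv_rank_notmem {t : String} (h : t ∉ pvPriorityTables) :
    pvRank.getD t pvSentinel = pvSentinel := by
  have hn : pvRank.get? t = none :=
    (PySem.Dict.get?_eq_none_iff_not_mem_keys pvRank t).mpr (by rw [pv_hkeys]; exact h)
  simp [PySem.Dict.getD, hn]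

theorem pv_rank_mem {t : String} (h : t ∈ pvPriorityTables) :
    pvRank.getD t pvSentinel < pvSentinel := by
  have hm : pvRank.getD t pvSentinel ∈ pvPriorityTables.map (fun t => pvRank.getD t pvSentinel) :=
    List.mem_map_of_mem h
  rw [pv_hmap] at hm
  have h28 : ∀ x ∈ ([0, 1, 2, 3, 4, 5, 6, 7, 8, 9, 10, 11, 12, 13, 14, 15, 16, 17, 18, 19, 20, 21, 22, 23, 24, 25, 26, 27] : List Int), x < pvSentinel := by decide
  exact h28 _ hm

theorem pv_pairP : pvPriorityTables.Pairwise
    (fun a b => pvRank.getD a pvSentinel < pvRank.getD b pvSentinel) := by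
  have h : (pvPriorityTables.map (fun t => pvRank.getD t pvSentinel)).Pairwise
      (fun a b => (a : Int) < b) := by rw [pv_hmap]; decide
  exact List.pairwise_map.mp h

-- ===== VERDICT (by name: the statement is the Claim_ definition above) =====
theorem ordered_tenant_purge_tables_py_spec : Claim_equal_ordered_tenant_purge_tables_py := by
  intro st _
  unfold Spec_ordered_tenant_purge_tables_py
  unfold ordered_tenant_purge_tables_py ordered_tenant_purge_tables_py_alt
  set K := PySem.List.dedup (st.map Prod.fst) with hKdef
  set S := PySem.List.sorted K (fun x => x) false with hSdef
  set F := pvPriorityTables.filter (fun t => decide (t ∈ K)) with hFdef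
  set key : String → Int ×ₗ String := fun t => toLex (pvRank.getD t pvSentinel, t) with hkey
  have hKnd : K.Nodup := PySem.List.nodup_dedup _
  have hSperm : S.Perm K := PySem.List.sorted_perm K (fun x => x) false
  have hSnd : S.Nodup := hSperm.symm.nodup hKnd
  -- membership facts
  have hFsub : ∀ a ∈ F, a ∈ K := by
    intro a ha
    simpa using (List.mem_filter.mp ha).2
  have hFP : ∀ a ∈ F, a ∈ pvPriorityTables := fun a ha => (List.mem_filter.mp ha).1
  have hS'notP : ∀ a, a ∈ S.filter (fun t => decide (t ∉ F)) → a ∉ pvPriorityTables := by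
    intro a ha hP
    rcases List.mem_filter.mp ha with ⟨haS, hanF⟩
    have haK : a ∈ K := hSperm.mem_iff.mp haS
    have : a ∈ F := List.mem_filter.mpr ⟨hP, by simpa using haK⟩
    simp [this] at hanF
  -- A's result
  have hA : (List.foldl (fun ord t => if t ∉ ord then ord ++ [t] else ord)
      (List.foldl (fun ord t => if t ∈ K ∧ t ∉ ord then ord ++ [t] else ord) [] pvPriorityTables) S)
      = F ++ S.filter (fun t => decide (t ∉ F)) := by
    rw [pv_loop1 K pvPriorityTables [] pv_nodupP (by simp), List.nil_append]
    exact pv_loop2 S F hSnd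
  rw [hA, pv_sorted2_lex]
  -- it remains: F ++ S.filter … = sorted K key
  refine (PySem.List.sorted_eq_of_perm_of_pairwise_lt K _ key ?_ ?_).symm
  · -- permutation
    have hnd : (F ++ S.filter (fun t => decide (t ∉ F))).Nodup := by
      rw [List.nodup_append]
      refine ⟨pv_nodupP.filter _, hSnd.filter _, ?_⟩
      intro a haF b hbS hab
      rcases List.mem_filter.mp hbS with ⟨_, hbnF⟩
      have hbnF' : b ∉ F := by simpa using hbnF
      exact hbnF' (hab ▸ haF)
    refine (List.perm_ext_iff_of_nodup hnd hKnd).mpr ?_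
    intro a
    constructor
    · intro h
      rcases List.mem_append.mp h with h | h
      · exact hFsub a h
      · exact hSperm.mem_iff.mp (List.mem_filter.mp h).1
    · intro h
      by_cases haF : a ∈ F
      · exact List.mem_append.mpr (Or.inl haF)
      · exact List.mem_append.mpr (Or.inr (List.mem_filter.mpr
          ⟨hSperm.mem_iff.mpr h, by simpa using haF⟩))
  · -- pairwise strictly increasing under key
    rw [List.pairwise_append]
    refine ⟨?_, ?_, ?_⟩
    · refine (pv_pairP.filter _).imp ?_
      intro a b hab
      rw [hkey, Prod.Lex.lt_iff]
      exact Or.inl hab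
    · have hle : S.Pairwise (fun a b => a ≤ b) :=
        PySem.List.sorted_pairwise K (fun x => x)
      have hlt : S.Pairwise (fun a b => a < b) :=
        (hle.and hSnd).imp (fun h => lt_of_le_of_ne h.1 h.2)
      refine (hlt.filter _).imp_of_mem ?_
      intro a b ha hb hab
      rw [hkey, Prod.Lex.lt_iff]
      refine Or.inr ⟨?_, hab⟩
      show pvRank.getD a pvSentinel = pvRank.getD b pvSentinel
      rw [pv_rank_notmem (hS'notP a ha), pv_rank_notmem (hS'notP b hb)]
    · intro a haF b hbS
      rw [hkey, Prod.Lex.lt_iff]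
      refine Or.inl ?_
      show pvRank.getD a pvSentinel < pvRank.getD b pvSentinel
      rw [pv_rank_notmem (hS'notP b hbS)]
      exact pv_rank_mem (hFP a haF)
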